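-- pv_equiv track=rewrite | github.com/zkwi/AiSRT | aisrt/postprocess.py | best_wrap_position
-- ===== SOURCE A (Python) =====
-- def best_wrap_position(text: str, max_line_chars: int) -> int:
--     middle = len(text) // 2
--     start = max(1, middle - max_line_chars // 2)
--     end = min(len(text) - 1, middle + max_line_chars // 2)
--     candidates = [index for index in range(start, end + 1) if text[index - 1] in "、，。.!！?？"]
--     if candidates:
--         return min(candidates, key=lambda index: abs(index - middle))
--     return min(max_line_chars, middle)
-- ===== SOURCE B (Python) =====
-- def best_wrap_position(text: str, max_line_chars: int) -> int:
--     middle = len(text) // 2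
--     start = max(1, middle - max_line_chars // 2)
--     end = min(len(text) - 1, middle + max_line_chars // 2)
--     puncts = "、，。.!！?？"
--     if start <= end:
--         for d in range(0, max(middle - start, end - middle) + 1):
--             i = middle - d
--             if start <= i <= end and text[i - 1] in puncts:
--                 return i
--             i = middle + d
--             if d > 0 and i <= end and start <= i and text[i - 1] in puncts:
--                 return i
--     return min(max_line_chars, middle)
-- ===== Notes on version B (the rewrite author's own statement) =====
-- stated objective: alternative
-- what changed: B replaces A's collect-all-candidates-then-min(key=distance) pass with an outward scan from the middle (d = 0, 1, 2, ... testing middle-d before middle+d) that returns the first punctuation-preceded index it meets, preserving A's smallest-index tie-break by construction.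
import Mathlib
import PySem

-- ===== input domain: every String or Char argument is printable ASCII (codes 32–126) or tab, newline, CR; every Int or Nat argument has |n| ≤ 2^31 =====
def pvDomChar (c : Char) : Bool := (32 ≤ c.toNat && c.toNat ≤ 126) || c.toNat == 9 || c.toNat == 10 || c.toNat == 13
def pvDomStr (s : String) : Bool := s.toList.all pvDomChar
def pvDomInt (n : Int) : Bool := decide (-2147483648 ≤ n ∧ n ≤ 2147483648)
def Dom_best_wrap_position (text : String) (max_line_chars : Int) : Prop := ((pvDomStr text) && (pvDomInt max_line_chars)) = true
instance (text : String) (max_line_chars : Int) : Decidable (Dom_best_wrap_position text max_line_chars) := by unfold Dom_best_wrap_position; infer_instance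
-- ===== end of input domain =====

-- B replaces A's collect-all-candidates-then-min(key=distance) pass with an outward scan from
-- the middle (testing middle-d before middle+d) returning the first hit; alternative decomposition,
-- same tie-break (smaller index wins), same fallback.

-- ===== PORT A =====
-- shared helper: Python's `text[i - 1] in "、，。.!！?？"` (both A and B contain this exact test)
def pvPuncts : List Char := ['、', '，', '。', '.', '!', '！', '?', '？']

def pvPunctAt (text : String) (i : Int) : Bool :=
  match PySem.Str.pyGet? text (i - 1) with
  | some c => pvPuncts.contains c
  | none => false

def best_wrap_position (text : String) (max_line_chars : Int) : Int :=
  let middle := PySem.Int.floordiv (PySem.Str.len text) 2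
  let start := max 1 (middle - PySem.Int.floordiv max_line_chars 2)
  let stop := min (PySem.Str.len text - 1) (middle + PySem.Int.floordiv max_line_chars 2)
  let candidates := (PySem.List.pyRange start (stop + 1) 1).filter (fun index => pvPunctAt text index)
  match PySem.List.min? candidates (fun index => |index - middle|) with
  | some v => v
  | none => min max_line_chars middle

-- ===== PORT B =====
def best_wrap_position_alt (text : String) (max_line_chars : Int) : Int :=
  let middle := PySem.Int.floordiv (PySem.Str.len text) 2
  let start := max 1 (middle - PySem.Int.floordiv max_line_chars 2)
  let stop := min (PySem.Str.len text - 1) (middle + PySem.Int.floordiv max_line_chars 2)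
  let hit : Option Int :=
    if start ≤ stop then
      (PySem.List.pyRange 0 (max (middle - start) (stop - middle) + 1) 1).foldl
        (fun acc d =>
          match acc with
          | some v => some v
          | none =>
            if start ≤ middle - d ∧ middle - d ≤ stop ∧ pvPunctAt text (middle - d) then
              some (middle - d)
            else if 0 < d ∧ middle + d ≤ stop ∧ start ≤ middle + d ∧ pvPunctAt text (middle + d) then
              some (middle + d)
            else none)
        none
    else none
  match hit with
  | some v => v
  | none => min max_line_chars middle

-- ===== PRECONDITION & SPEC =====
def Spec_best_wrap_position (text : String) (max_line_chars : Int) (out : Int) : Prop := out = best_wrap_position_alt text max_line_chars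
instance (text : String) (max_line_chars : Int) (out : Int) : Decidable (Spec_best_wrap_position text max_line_chars out) := by unfold Spec_best_wrap_position; infer_instance

-- ===== CLAIM (what is proved, stated in full; the proofs are below) =====
def Claim_equal_best_wrap_position : Prop := ∀ (text : String) (max_line_chars : Int), Dom_best_wrap_position text max_line_chars → Spec_best_wrap_position text max_line_chars (best_wrap_position text max_line_chars)

-- ===== LEMMAS AND PROOFS =====

-- B's one-step function (abstracted over the punctuation test Q)
def pvG (Q : Int → Bool) (s e m d : Int) : Option Int :=
  if s ≤ m - d ∧ m - d ≤ e ∧ Q (m - d) then some (m - d)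
  else if 0 < d ∧ m + d ≤ e ∧ s ≤ m + d ∧ Q (m + d) then some (m + d)
  else none

-- the "lexicographically minimal by (distance, index)" predicate shared by both sides
def pvPred (key : Int → Int) (l : List Int) (v : Int) : Prop :=
  v ∈ l ∧ ∀ y ∈ l, key v < key y ∨ (key v = key y ∧ v ≤ y)

theorem pvPred_unique {key : Int → Int} {l : List Int} {v w : Int}
    (hv : pvPred key l v) (hw : pvPred key l w) : v = w := by
  rcases hv with ⟨hvm, hvall⟩
  rcases hw with ⟨hwm, hwall⟩
  rcases hvall w hwm with h1 | ⟨h1, h2⟩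
  · rcases hwall v hvm with h3 | ⟨h3, _⟩ <;> omega
  · rcases hwall v hvm with h3 | ⟨h3, h4⟩ <;> omega

-- if the window contains y, B's step fires at distance |y - m|
theorem pvG_some_of_W {Q : Int → Bool} {s e m y : Int}
    (h1 : s ≤ y) (h2 : y ≤ e) (h3 : Q y = true) :
    ∃ v, pvG Q s e m |y - m| = some v := by
  have hnn : 0 ≤ |y - m| := abs_nonneg _
  unfold pvG
  by_cases hym : y ≤ m
  · have hy : m - |y - m| = y := by rcases abs_choice (y - m) with h | h <;> omega
    rw [hy, if_pos ⟨h1, h2, h3⟩]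
    exact ⟨y, rfl⟩
  · push Not at hym
    have hy : m + |y - m| = y := by rcases abs_choice (y - m) with h | h <;> omega
    have h0 : 0 < |y - m| := by rcases abs_choice (y - m) with h | h <;> omega
    split_ifs with hc1 hc2
    · exact ⟨_, rfl⟩
    · exact ⟨_, rfl⟩
    · exfalso
      exact hc2 ⟨h0, by rw [hy]; exact h2, by rw [hy]; omega, by rw [hy]; exact h3⟩

-- option-accumulator foldl with early exit = findSome?
theorem pvFoldlSome (g : Int → Option Int) (l : List Int) (a : Int) :
    l.foldl (fun acc d => match acc with | some v => some v | none => g d) (some a) = some a := by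
  induction l with
  | nil => rfl
  | cons x t ih => simpa using ih

theorem pvFoldlOpt (g : Int → Option Int) (l : List Int) :
    l.foldl (fun acc d => match acc with | some v => some v | none => g d) none = l.findSome? g := by
  induction l with
  | nil => rfl
  | cons x t ih =>
    simp only [List.foldl_cons, List.findSome?_cons]
    cases hx : g x with
    | none => simpa [hx] using ih
    | some v => simpa [hx] using pvFoldlSome g t v

-- findSome? over List.range: none means all none; some means a first hit
theorem pvFindRangeNone {h : Nat → Option Int} {N : Nat}
    (hn : (List.range N).findSome? h = none) : ∀ k < N, h k = none := by
  intro k hk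
  have := List.findSome?_eq_none_iff.mp hn k (List.mem_range.mpr hk)
  simpa using this

theorem pvFindRangeSome {h : Nat → Option Int} {N : Nat} {v : Int}
    (hs : (List.range N).findSome? h = some v) :
    ∃ k, k < N ∧ h k = some v ∧ ∀ j < k, h j = none := by
  induction N with
  | zero => simp at hs
  | succ n ih =>
    rw [List.range_succ, List.findSome?_append] at hs
    cases hp : (List.range n).findSome? h with
    | some w =>
      rw [hp] at hs
      simp at hs
      subst hs
      obtain ⟨k, hk, hh, hall⟩ := ih hp
      exact ⟨k, Nat.lt_succ_of_lt hk, hh, hall⟩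
    | none =>
      rw [hp] at hs
      simp at hs
      exact ⟨n, Nat.lt_succ_self n, hs, fun j hj => pvFindRangeNone hp j hj⟩

-- the running-min-by-key fold (Python min with key), over a strictly increasing list
theorem pvFoldMin (key : Int → Int) : ∀ (xs : List Int) (a : Int),
    (∀ y ∈ xs, a < y) → xs.Pairwise (· < ·) →
    (xs.foldl (fun mm x => if key x < key mm then x else mm) a = a ∨
      xs.foldl (fun mm x => if key x < key mm then x else mm) a ∈ xs) ∧
    key (xs.foldl (fun mm x => if key x < key mm then x else mm) a) ≤ key a ∧
    (∀ y ∈ xs, key (xs.foldl (fun mm x => if key x < key mm then x else mm) a) < key y ∨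
      (key (xs.foldl (fun mm x => if key x < key mm then x else mm) a) = key y ∧
        xs.foldl (fun mm x => if key x < key mm then x else mm) a ≤ y)) ∧
    (key (xs.foldl (fun mm x => if key x < key mm then x else mm) a) = key a →
      xs.foldl (fun mm x => if key x < key mm then x else mm) a = a) := by
  intro xs
  induction xs with
  | nil => intro a _ _; simp
  | cons x t ih =>
    intro a hlt hpw
    have hax : a < x := hlt x (List.mem_cons_self ..)
    have hxt : ∀ y ∈ t, x < y := fun y hy => (List.pairwise_cons.mp hpw).1 y hy
    have hpt : t.Pairwise (· < ·) := (List.pairwise_cons.mp hpw).2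
    simp only [List.foldl_cons]
    by_cases hka : key x < key a
    · rw [if_pos hka]
      obtain ⟨ih1, ih2, ih3, ih4⟩ := ih x hxt hpt
      set r := t.foldl (fun mm x => if key x < key mm then x else mm) x with hr
      refine ⟨?_, by omega, ?_, by intro h; omega⟩
      · rcases ih1 with h | h
        · exact Or.inr (h ▸ List.mem_cons_self ..)
        · exact Or.inr (List.mem_cons_of_mem _ h)
      · intro y hy
        rcases List.mem_cons.mp hy with rfl | hy
        · by_cases hke : key r = key y
          · exact Or.inr ⟨hke, le_of_eq (ih4 hke)⟩
          · exact Or.inl (lt_of_le_of_ne ih2 hke)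
        · exact ih3 y hy
    · rw [if_neg hka]
      have hkax : key a ≤ key x := le_of_not_gt hka
      obtain ⟨ih1, ih2, ih3, ih4⟩ := ih a (fun y hy => lt_trans hax (hxt y hy)) hpt
      set r := t.foldl (fun mm x => if key x < key mm then x else mm) a with hr
      refine ⟨?_, ih2, ?_, ih4⟩
      · rcases ih1 with h | h
        · exact Or.inl h
        · exact Or.inr (List.mem_cons_of_mem _ h)
      · intro y hy
        rcases List.mem_cons.mp hy with rfl | hy
        · by_cases hke : key r = key y
          · have hra : r = a := ih4 (by omega)
            exact Or.inr ⟨hke, le_of_lt (hra ▸ hax)⟩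
          · exact Or.inl (by omega)
        · exact ih3 y hy

-- PySem.List.min? over a cons as the running fold
theorem pvMinFold (key : Int → Int) (t : List Int) (h : Int) :
    PySem.List.min? (h :: t) key = some (t.foldl (fun mm x => if key x < key mm then x else mm) h) := by
  show List.foldl _ (some h) t = _
  induction t generalizing h with
  | nil => rfl
  | cons x s ih =>
    simp only [List.foldl_cons]
    split_ifs with hc <;> simp [ih]

-- A's min? over a strictly increasing list satisfies pvPred
theorem pvMinPred {key : Int → Int} {l : List Int} {v : Int}
    (hpw : l.Pairwise (· < ·)) (hm : PySem.List.min? l key = some v) : pvPred key l v := by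
  cases l with
  | nil => simp [PySem.List.min?] at hm
  | cons h t =>
    rw [pvMinFold] at hm
    have hv := (Option.some_inj.mp hm)
    have hht : ∀ y ∈ t, h < y := fun y hy => (List.pairwise_cons.mp hpw).1 y hy
    obtain ⟨f1, f2, f3, f4⟩ := pvFoldMin key t h hht (List.pairwise_cons.mp hpw).2
    rw [hv] at f1 f2 f3 f4
    unfold pvPred
    constructor
    · rcases f1 with h1 | h1
      · exact h1 ▸ List.mem_cons_self ..
      · exact List.mem_cons_of_mem _ h1
    · intro y hy
      rcases List.mem_cons.mp hy with rfl | hy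
      · by_cases hke : key v = key y
        · exact Or.inr ⟨hke, le_of_eq (f4 hke)⟩
        · exact Or.inl (lt_of_le_of_ne f2 hke)
      · exact f3 y hy

-- the candidate list
def pvL (Q : Int → Bool) (s e : Int) : List Int := (PySem.List.pyRange s (e + 1) 1).filter Q

theorem pvL_mem {Q : Int → Bool} {s e y : Int} :
    y ∈ pvL Q s e ↔ (s ≤ y ∧ y ≤ e ∧ Q y = true) := by
  unfold pvL
  rw [List.mem_filter, PySem.List.mem_pyRange_one]
  constructor
  · rintro ⟨⟨hh1, hh2⟩, hh3⟩; exact ⟨hh1, by omega, hh3⟩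
  · rintro ⟨hh1, hh2, hh3⟩; exact ⟨⟨hh1, by omega⟩, hh3⟩

theorem pvL_pairwise (Q : Int → Bool) (s e : Int) : (pvL Q s e).Pairwise (· < ·) :=
  (PySem.List.pairwise_lt_pyRange_one s (e + 1)).filter Q

-- any window element has distance ≤ D = max (m - s) (e - m)
theorem pvDist_le {s e m y : Int} (h1 : s ≤ y) (h2 : y ≤ e) :
    |y - m| ≤ max (m - s) (e - m) := by
  have := le_max_left (m - s) (e - m)
  have := le_max_right (m - s) (e - m)
  rcases abs_choice (y - m) with h | h <;> omega

-- B's findSome? hit satisfies pvPred; B's none means empty candidate list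
theorem pvHitPred {Q : Int → Bool} {s e m v : Int} (hse : s ≤ e)
    (hs : (List.range (max (m - s) (e - m) + 1).toNat).findSome? (fun k : Nat => pvG Q s e m (k : Int)) = some v) :
    pvPred (fun i => |i - m|) (pvL Q s e) v := by
  obtain ⟨k, hkN, hgk, hall⟩ := pvFindRangeSome hs
  have hD0 : 0 ≤ max (m - s) (e - m) := by
    have := le_max_left (m - s) (e - m); have := le_max_right (m - s) (e - m); omega
  -- extract the window facts about v from pvG
  have hW : (s ≤ v ∧ v ≤ e ∧ Q v = true) ∧ |v - m| = (k : Int) ∧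
      (v = m + (k : Int) ∧ 0 < (k : Int) → ¬(s ≤ m - (k : Int) ∧ m - (k : Int) ≤ e ∧ Q (m - (k : Int)) = true)) := by
    unfold pvG at hgk
    split_ifs at hgk with hc1 hc2
    · cases hgk
      refine ⟨⟨hc1.1, hc1.2.1, hc1.2.2⟩, ?_, ?_⟩
      · have h9 : m - (k : Int) - m = -(k : Int) := by ring
        rw [h9, abs_neg, abs_of_nonneg (Int.natCast_nonneg k)]
      · rintro ⟨hv, hk⟩; exfalso; omega
    · cases hgk
      refine ⟨⟨hc2.2.2.1, hc2.2.1, hc2.2.2.2⟩, ?_, fun _ => hc1⟩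
      have h9 : m + (k : Int) - m = (k : Int) := by ring
      rw [h9, abs_of_nonneg (Int.natCast_nonneg k)]
  obtain ⟨hWv, hdv, hnotleft⟩ := hW
  constructor
  · exact pvL_mem.mpr hWv
  · intro y hy
    have hWy := pvL_mem.mp hy
    have hdyD : |y - m| ≤ max (m - s) (e - m) := pvDist_le hWy.1 hWy.2.1
    have hdy0 : 0 ≤ |y - m| := abs_nonneg _
    -- the scan cannot have passed |y - m| silently
    have hge : (k : Int) ≤ |y - m| := by
      by_contra hlt
      push Not at hlt
      have hj : (|y - m|).toNat < k := by omega
      have hjg := hall _ hj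
      have hcast : ((|y - m|).toNat : Int) = |y - m| := Int.toNat_of_nonneg hdy0
      rw [hcast] at hjg
      obtain ⟨w, hw⟩ := pvG_some_of_W (m := m) hWy.1 hWy.2.1 hWy.2.2
      rw [hw] at hjg; cases hjg
    show |v - m| < |y - m| ∨ (|v - m| = |y - m| ∧ v ≤ y)
    by_cases heq : |v - m| = |y - m|
    · refine Or.inr ⟨heq, ?_⟩
      -- same distance: y = m - k or y = m + k
      by_cases hvleft : v = m - (k : Int)
      · rcases abs_choice (y - m) with h | h <;> rcases abs_choice (v - m) with h' | h' <;> omega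
      · have hvright : v = m + (k : Int) := by
          rcases abs_choice (v - m) with h' | h' <;> omega
        have hkpos : 0 < (k : Int) := by
          rcases abs_choice (v - m) with h' | h' <;> omega
        have := hnotleft ⟨hvright, hkpos⟩
        have hyy : y = m - (k : Int) ∨ y = m + (k : Int) := by
          rcases abs_choice (y - m) with h | h <;> omega
        rcases hyy with rfl | rfl
        · exact absurd ⟨hWy.1, hWy.2.1, hWy.2.2⟩ this
        · omega
    · exact Or.inl (by omega)

theorem pvHitNone {Q : Int → Bool} {s e m : Int}
    (hn : (List.range (max (m - s) (e - m) + 1).toNat).findSome? (fun k : Nat => pvG Q s e m (k : Int)) = none) :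
    pvL Q s e = [] := by
  by_contra hne
  obtain ⟨y, hy⟩ := List.exists_mem_of_ne_nil _ hne
  have hWy := pvL_mem.mp hy
  have hdyD : |y - m| ≤ max (m - s) (e - m) := pvDist_le hWy.1 hWy.2.1
  have hdy0 : 0 ≤ |y - m| := abs_nonneg _
  have hD0 : 0 ≤ max (m - s) (e - m) := le_trans hdy0 hdyD
  have hj : (|y - m|).toNat < (max (m - s) (e - m) + 1).toNat := by omega
  have hjg := pvFindRangeNone hn _ hj
  have hcast : (((|y - m|).toNat : Nat) : Int) = |y - m| := Int.toNat_of_nonneg hdy0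
  rw [hcast] at hjg
  obtain ⟨w, hw⟩ := pvG_some_of_W (m := m) hWy.1 hWy.2.1 hWy.2.2
  rw [hw] at hjg; cases hjg

-- the generic core equivalence
theorem pvCore (Q : Int → Bool) (m s e fb : Int) :
    (match PySem.List.min? ((PySem.List.pyRange s (e + 1) 1).filter Q) (fun index => |index - m|) with
     | some v => v
     | none => fb)
    =
    (match (if s ≤ e then
              (PySem.List.pyRange 0 (max (m - s) (e - m) + 1) 1).foldl
                (fun acc d =>
                  match acc with
                  | some v => some v
                  | none =>
                    if s ≤ m - d ∧ m - d ≤ e ∧ Q (m - d) then some (m - d)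
                    else if 0 < d ∧ m + d ≤ e ∧ s ≤ m + d ∧ Q (m + d) then some (m + d)
                    else none)
                none
            else none) with
     | some v => v
     | none => fb) := by
  by_cases hse : s ≤ e
  · rw [if_pos hse]
    -- rewrite B's fold to findSome? over a range of Nats
    have hstep : (fun (acc : Option Int) (d : Int) =>
          match acc with
          | some v => some v
          | none =>
            if s ≤ m - d ∧ m - d ≤ e ∧ Q (m - d) then some (m - d)
            else if 0 < d ∧ m + d ≤ e ∧ s ≤ m + d ∧ Q (m + d) then some (m + d)
            else none)
        = (fun (acc : Option Int) (d : Int) => match acc with | some v => some v | none => pvG Q s e m d) := by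
      funext acc d; cases acc <;> rfl
    have hfold : (PySem.List.pyRange 0 (max (m - s) (e - m) + 1) 1).foldl
        (fun acc d =>
          match acc with
          | some v => some v
          | none =>
            if s ≤ m - d ∧ m - d ≤ e ∧ Q (m - d) then some (m - d)
            else if 0 < d ∧ m + d ≤ e ∧ s ≤ m + d ∧ Q (m + d) then some (m + d)
            else none)
        none
        = (List.range (max (m - s) (e - m) + 1).toNat).findSome? (fun k : Nat => pvG Q s e m (k : Int)) := by
      rw [PySem.List.pyRange_one, hstep, pvFoldlOpt (pvG Q s e m)]
      rw [List.findSome?_map]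
      simp only [sub_zero, zero_add]
      rfl
    rw [hfold]
    cases hhit : (List.range (max (m - s) (e - m) + 1).toNat).findSome? (fun k : Nat => pvG Q s e m (k : Int)) with
    | some v =>
      have hbp := pvHitPred hse hhit
      have hLne : pvL Q s e ≠ [] := by
        intro h; rw [h] at hbp; exact absurd hbp.1 (List.not_mem_nil)
      cases hmin : PySem.List.min? (pvL Q s e) (fun index => |index - m|) with
      | none => exact absurd ((PySem.List.min?_eq_none_iff _ _).mp hmin) hLne
      | some w =>
        have hap := pvMinPred (pvL_pairwise Q s e) hmin
        have : w = v := pvPred_unique hap hbp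
        show (match PySem.List.min? (pvL Q s e) _ with | some v => v | none => fb) = v
        rw [hmin, this]
    | none =>
      have hLnil := pvHitNone hhit
      show (match PySem.List.min? (pvL Q s e) _ with | some v => v | none => fb) = fb
      rw [hLnil]
      rfl
  · rw [if_neg hse]
    have hLnil : (PySem.List.pyRange s (e + 1) 1).filter Q = [] := by
      rw [PySem.List.pyRange_one]
      have : (e + 1 - s).toNat = 0 := by omega
      rw [this]
      rfl
    rw [hLnil]
    rfl

-- ===== VERDICT (by name: the statement is the Claim_ definition above) =====
theorem best_wrap_position_spec : Claim_equal_best_wrap_position := by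
  intro text max_line_chars _
  unfold Spec_best_wrap_position best_wrap_position best_wrap_position_alt
  exact pvCore (fun i => pvPunctAt text i)
    (PySem.Int.floordiv (PySem.Str.len text) 2)
    (max 1 (PySem.Int.floordiv (PySem.Str.len text) 2 - PySem.Int.floordiv max_line_chars 2))
    (min (PySem.Str.len text - 1) (PySem.Int.floordiv (PySem.Str.len text) 2 + PySem.Int.floordiv max_line_chars 2))
    (min max_line_chars (PySem.Int.floordiv (PySem.Str.len text) 2))
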